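-- pv_equiv track=rewrite | github.com/doasfrancisco/mcp_servers | mcps/gmail/gmail_client.py | _plain_to_html
-- ===== SOURCE A (Python) =====
-- def _plain_to_html(text: str) -> str:
--     """Convert plain text to HTML with proper paragraph spacing."""
--     import html as _html
--
--     paragraphs = text.split("\n\n")
--     html_parts = []
--     for p in paragraphs:
--         escaped = _html.escape(p)
--         escaped = escaped.replace("\n", "<br>")
--         html_parts.append(f"<p>{escaped}</p>")
--     return "".join(html_parts)
-- ===== SOURCE B (Python) =====
-- _ESC = {"&": "&amp;", "<": "&lt;", ">": "&gt;", '"': "&quot;", "'": "&#x27;", "\n": "<br>"}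
--
--
-- def _plain_to_html(text: str) -> str:
--     """Single left-to-right scan: paragraph breaks on double newline, char table for escapes."""
--     out = ["<p>"]
--     i = 0
--     n = len(text)
--     while i < n:
--         if text[i] == "\n" and i + 1 < n and text[i + 1] == "\n":
--             out.append("</p><p>")
--             i += 2
--         else:
--             out.append(_ESC.get(text[i], text[i]))
--             i += 1
--     out.append("</p>")
--     return "".join(out)
-- ===== Notes on version B (the rewrite author's own statement) =====
-- stated objective: alternative
-- what changed: A splits the text on double newlines, then escapes, break-tag-replaces and wraps each paragraph in a loop before joining; B makes a single left-to-right scan over the characters with a one-character lookahead for the paragraph break and a single escape table, building the output in one pass.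
import Mathlib
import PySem

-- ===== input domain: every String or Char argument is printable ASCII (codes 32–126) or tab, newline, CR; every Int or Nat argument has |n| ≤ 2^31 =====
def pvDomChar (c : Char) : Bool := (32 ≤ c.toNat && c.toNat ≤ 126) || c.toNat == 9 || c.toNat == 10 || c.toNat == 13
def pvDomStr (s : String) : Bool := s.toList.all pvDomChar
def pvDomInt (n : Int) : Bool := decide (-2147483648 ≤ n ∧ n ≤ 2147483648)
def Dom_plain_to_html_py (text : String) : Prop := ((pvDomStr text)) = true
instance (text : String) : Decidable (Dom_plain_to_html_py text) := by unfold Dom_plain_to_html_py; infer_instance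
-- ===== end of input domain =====

-- B replaces A's split-into-paragraphs loop (escape + "<br>"-replace per paragraph, then join)
-- by a single left-to-right character scan with a one-character lookahead for "\n\n" and one
-- escape table (objective: alternative).

-- ===== PORT A =====
-- hand port of the stdlib call html.escape(s) (quote defaults to True): CPython's five
-- chained str.replace calls, exact on every input (PySem.Str.replace is Python's str.replace)
def pyHtmlEscape (s : String) : String :=
  let s1 := PySem.Str.replace s "&" "&amp;"
  let s2 := PySem.Str.replace s1 "<" "&lt;"
  let s3 := PySem.Str.replace s2 ">" "&gt;"
  let s4 := PySem.Str.replace s3 "\"" "&quot;"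
  PySem.Str.replace s4 "'" "&#x27;"

def plain_to_html_py (text : String) : String :=
  let paragraphs := (PySem.Str.split? text "\n\n").getD []   -- sep ≠ "", so split? is always some
  let html_parts := paragraphs.map (fun p =>
    let escaped := pyHtmlEscape p
    let escaped2 := PySem.Str.replace escaped "\n" "<br>"
    "<p>" ++ escaped2 ++ "</p>")
  PySem.Str.join "" html_parts

-- ===== PORT B =====
-- _ESC.get(text[i], text[i]) as a character table
def escGet (c : Char) : List Char :=
  if c = '&' then ['&', 'a', 'm', 'p', ';']
  else if c = '<' then ['&', 'l', 't', ';']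
  else if c = '>' then ['&', 'g', 't', ';']
  else if c = '"' then ['&', 'q', 'u', 'o', 't', ';']
  else if c = '\'' then ['&', '#', 'x', '2', '7', ';']
  else if c = '\n' then ['<', 'b', 'r', '>']
  else [c]

-- B's while loop: one pass over the characters, one-character lookahead for the paragraph break
def convGo : List Char → List Char
  | '\n' :: '\n' :: r => ['<', '/', 'p', '>', '<', 'p', '>'] ++ convGo r
  | c :: r => escGet c ++ convGo r
  | [] => []

def plain_to_html_py_alt (text : String) : String :=
  String.ofList (['<', 'p', '>'] ++ convGo text.toList ++ ['<', '/', 'p', '>'])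

-- ===== PRECONDITION & SPEC =====
def Spec_plain_to_html_py (text : String) (out : String) : Prop := out = plain_to_html_py_alt text
instance (text : String) (out : String) : Decidable (Spec_plain_to_html_py text out) := by unfold Spec_plain_to_html_py; infer_instance

-- ===== CLAIM (what is proved, stated in full; the proofs are below) =====
def Claim_equal_plain_to_html_py : Prop := ∀ (text : String), Dom_plain_to_html_py text → Spec_plain_to_html_py text (plain_to_html_py text)

-- ===== LEMMAS AND PROOFS =====

-- Python str.replace with a one-character pattern is a character-wise flatMap.
theorem replace_single_go (a : Char) (new : List Char) :
    ∀ (l : List Char) (fuel : Nat) (acc : List Char), l.length ≤ fuel →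
      PySem.Chars.replace.go [a] new fuel l acc
        = acc.reverse ++ l.flatMap (fun c => if c = a then new else [c]) := by
  intro l
  induction l with
  | nil =>
    intro fuel acc _
    cases fuel <;> simp [PySem.Chars.replace.go]
  | cons c t ih =>
    intro fuel acc h
    cases fuel with
    | zero => simp at h
    | succ n =>
      rw [PySem.Chars.replace.go]
      by_cases hc : c = a
      · subst hc
        simp only [List.isPrefixOf, beq_self_eq_true, Bool.true_and, if_pos,
          List.length_cons, List.length_nil, List.drop_succ_cons, List.drop_zero]
        rw [ih _ _ (by simpa using h)]
        simp
      · have hp : ([a].isPrefixOf (c :: t)) = false := by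
          simp [List.isPrefixOf]
          exact fun h' => absurd h'.symm hc
        rw [hp]
        simp only [Bool.false_eq_true, if_false]
        rw [ih _ _ (by simpa using h)]
        simp [hc]

theorem replace_single (s : List Char) (a : Char) (new : List Char) :
    PySem.Chars.replace s [a] new = s.flatMap (fun c => if c = a then new else [c]) := by
  rw [PySem.Chars.replace]
  simp only [List.isEmpty_cons, Bool.false_eq_true, if_false]
  rw [replace_single_go a new s s.length [] (Nat.le_refl _)]
  simp

-- A's leftmost-match split on "\n\n", written as the structural recursion B's scan follows
def splitNN : List Char → List (List Char)
  | '\n' :: '\n' :: r => [] :: splitNN r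
  | c :: r =>
    match splitNN r with
    | [] => [[c]]
    | p :: ps => (c :: p) :: ps
  | [] => [[]]

theorem splitNN_ne_nil (cs : List Char) : splitNN cs ≠ [] := by
  induction cs using splitNN.induct <;> simp_all [splitNN]

-- the split in progress: current chunk prefix consed onto the head of the remaining split
def consH (x : List Char) : List (List Char) → List (List Char)
  | [] => [x]
  | p :: ps => (x ++ p) :: ps

theorem splitOn_go :
    ∀ (l : List Char) (fuel : Nat) (cur : List Char) (acc : List (List Char)),
      l.length < fuel →
      PySem.Chars.splitOn.go ['\n', '\n'] fuel l cur acc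
        = acc.reverse ++ consH cur.reverse (splitNN l) := by
  intro l
  induction l using splitNN.induct with
  | case1 r ih =>
    intro fuel cur acc h
    cases fuel with
    | zero => simp at h
    | succ n =>
      rw [PySem.Chars.splitOn.go]
      have hp : (['\n', '\n'].isPrefixOf ('\n' :: '\n' :: r)) = true := by
        simp [List.isPrefixOf]
      rw [hp]
      simp only [if_pos, List.length_cons, List.length_nil, List.drop_succ_cons,
        List.drop_zero]
      rw [ih _ _ _ (by simp at h; omega)]
      obtain ⟨p, ps, hps⟩ := List.exists_cons_of_ne_nil (splitNN_ne_nil r)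
      simp [splitNN, hps, consH]
  | case2 c r hne hsplit ih =>
    exact absurd hsplit (splitNN_ne_nil r)
  | case3 c r hne p ps hsplit ih =>
    intro fuel cur acc h
    cases fuel with
    | zero => simp at h
    | succ n =>
      rw [PySem.Chars.splitOn.go]
      have hp : (['\n', '\n'].isPrefixOf (c :: r)) = false := by
        by_cases hc : c = '\n'
        · subst hc
          cases r with
          | nil => simp [List.isPrefixOf]
          | cons d r' =>
            have hd : d ≠ '\n' := fun hd => hne r' rfl (by rw [hd])
            simp [List.isPrefixOf]
            intro h'
            exact absurd h'.symm hd
        · simp [List.isPrefixOf]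
          intro h'
          exact absurd h'.symm hc
      rw [hp]
      simp only [Bool.false_eq_true, if_false]
      rw [ih _ _ _ (by simp at h; omega)]
      have hstep : splitNN (c :: r) = (c :: p) :: ps := by
        rw [splitNN.eq_def]
        split
        · rename_i r1 heq
          rw [List.cons.injEq] at heq
          exact absurd (hne r1 heq.1 heq.2) id
        · rename_i c1 r1 heq
          rw [List.cons.injEq] at heq
          obtain ⟨hc1, hr1⟩ := heq
          subst hc1; subst hr1
          rw [hsplit]
        · rename_i heq
          simp at heq
      rw [hstep, hsplit]
      simp [consH]
  | case4 =>
    intro fuel cur acc h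
    cases fuel with
    | zero => simp at h
    | succ n =>
      rw [PySem.Chars.splitOn.go]
      simp [splitNN, consH]
      omega

theorem splitOn_eq_splitNN (cs : List Char) :
    PySem.Chars.splitOn cs ['\n', '\n'] = splitNN cs := by
  rw [PySem.Chars.splitOn]
  rw [splitOn_go cs (cs.length + 1) [] [] (by omega)]
  obtain ⟨p, ps, hps⟩ := List.exists_cons_of_ne_nil (splitNN_ne_nil cs)
  simp [hps, consH]

-- the escaped paragraphs of the split, interleaved with "</p><p>"
def joinBody : List (List Char) → List Char
  | [] => []
  | [p] => p.flatMap escGet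
  | p :: q :: ps => p.flatMap escGet ++ ['<', '/', 'p', '>', '<', 'p', '>'] ++ joinBody (q :: ps)

theorem convGo_cons (c : Char) (r : List Char)
    (h : ∀ r', c = '\n' → r = '\n' :: r' → False) :
    convGo (c :: r) = escGet c ++ convGo r := by
  rw [convGo.eq_def]
  split
  · rename_i r1 heq
    rw [List.cons.injEq] at heq
    exact absurd (h r1 heq.1 heq.2) id
  · rename_i c1 r1 heq
    rw [List.cons.injEq] at heq
    obtain ⟨hc1, hr1⟩ := heq
    subst hc1; subst hr1
    rfl
  · rename_i heq
    simp at heq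

theorem convGo_eq_joinBody (cs : List Char) : convGo cs = joinBody (splitNN cs) := by
  induction cs using splitNN.induct with
  | case1 r ih =>
    obtain ⟨p, ps, hps⟩ := List.exists_cons_of_ne_nil (splitNN_ne_nil r)
    rw [show splitNN ('\n' :: '\n' :: r) = [] :: splitNN r from by simp [splitNN]]
    rw [hps, show convGo ('\n' :: '\n' :: r) = ['<', '/', 'p', '>', '<', 'p', '>'] ++ convGo r from rfl]
    rw [ih, hps]
    simp [joinBody]
  | case2 c r hne hsplit ih => exact absurd hsplit (splitNN_ne_nil r)
  | case3 c r hne p ps hsplit ih =>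
    have hstep : splitNN (c :: r) = (c :: p) :: ps := by
      rw [splitNN.eq_def]
      split
      · rename_i r1 heq
        rw [List.cons.injEq] at heq
        exact absurd (hne r1 heq.1 heq.2) id
      · rename_i c1 r1 heq
        rw [List.cons.injEq] at heq
        obtain ⟨hc1, hr1⟩ := heq
        subst hc1; subst hr1
        rw [hsplit]
      · rename_i heq
        simp at heq
    rw [convGo_cons c r hne, ih, hsplit, hstep]
    cases ps with
    | nil => simp [joinBody]
    | cons q qs => simp [joinBody]
  | case4 => simp [convGo, splitNN, joinBody]

-- the five escape replaces followed by the "<br>" replace collapse to B's single table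
theorem escChar_comp (c : Char) :
    ((((((if c = '&' then ['&', 'a', 'm', 'p', ';'] else [c]).flatMap
        (fun c => if c = '<' then ['&', 'l', 't', ';'] else [c])).flatMap
        (fun c => if c = '>' then ['&', 'g', 't', ';'] else [c])).flatMap
        (fun c => if c = '"' then ['&', 'q', 'u', 'o', 't', ';'] else [c])).flatMap
        (fun c => if c = '\'' then ['&', '#', 'x', '2', '7', ';'] else [c])).flatMap
        (fun c => if c = '\n' then ['<', 'b', 'r', '>'] else [c]))
      = escGet c := by
  by_cases h1 : c = '&'
  · subst h1; decide
  by_cases h2 : c = '<'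
  · subst h2; decide
  by_cases h3 : c = '>'
  · subst h3; decide
  by_cases h4 : c = '"'
  · subst h4; decide
  by_cases h5 : c = '\''
  · subst h5; decide
  by_cases h6 : c = '\n'
  · subst h6; decide
  simp [escGet, h1, h2, h3, h4, h5, h6]

theorem escChain (cs : List Char) :
    PySem.Chars.replace
      (PySem.Chars.replace
        (PySem.Chars.replace
          (PySem.Chars.replace
            (PySem.Chars.replace
              (PySem.Chars.replace cs ['&'] ['&', 'a', 'm', 'p', ';'])
              ['<'] ['&', 'l', 't', ';'])
            ['>'] ['&', 'g', 't', ';'])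
          ['"'] ['&', 'q', 'u', 'o', 't', ';'])
        ['\''] ['&', '#', 'x', '2', '7', ';'])
      ['\n'] ['<', 'b', 'r', '>']
      = cs.flatMap escGet := by
  simp only [replace_single]
  induction cs with
  | nil => simp
  | cons c t ih =>
    simp only [List.flatMap_cons, List.flatMap_append, ih]
    rw [escChar_comp c]

-- joining the wrapped paragraphs = one leading "<p>", the interleaved body, one trailing "</p>"
theorem joinWrap : ∀ (ps : List (List Char)), ps ≠ [] →
    PySem.Chars.join []
        (ps.map (fun l => ['<', 'p', '>'] ++ l.flatMap escGet ++ ['<', '/', 'p', '>']))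
      = ['<', 'p', '>'] ++ joinBody ps ++ ['<', '/', 'p', '>'] := by
  intro ps
  induction ps with
  | nil => intro h; exact absurd rfl h
  | cons p qs ih =>
    intro _
    cases qs with
    | nil => simp [PySem.Chars.join_singleton, joinBody]
    | cons q qs' =>
      have ih' := ih (by simp)
      rw [List.map_cons] at ih'
      rw [List.map_cons, List.map_cons, PySem.Chars.join_cons_cons, ih']
      simp [joinBody]

theorem part_toList (p : String) :
    ("<p>" ++ PySem.Str.replace (pyHtmlEscape p) "\n" "<br>" ++ "</p>").toList
      = ['<', 'p', '>'] ++ p.toList.flatMap escGet ++ ['<', '/', 'p', '>'] := by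
  simp only [String.toList_append, PySem.Str.toList_replace, pyHtmlEscape]
  rw [show "\n".toList = ['\n'] from rfl, show "<br>".toList = ['<', 'b', 'r', '>'] from rfl,
    show "&".toList = ['&'] from rfl, show "&amp;".toList = ['&', 'a', 'm', 'p', ';'] from rfl,
    show "<".toList = ['<'] from rfl, show "&lt;".toList = ['&', 'l', 't', ';'] from rfl,
    show ">".toList = ['>'] from rfl, show "&gt;".toList = ['&', 'g', 't', ';'] from rfl,
    show "\"".toList = ['"'] from rfl, show "&quot;".toList = ['&', 'q', 'u', 'o', 't', ';'] from rfl,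
    show "'".toList = ['\''] from rfl, show "&#x27;".toList = ['&', '#', 'x', '2', '7', ';'] from rfl]
  rw [escChain]
  rfl

theorem main_eq (text : String) : plain_to_html_py text = plain_to_html_py_alt text := by
  rw [plain_to_html_py, plain_to_html_py_alt, PySem.Str.join]
  congr 1
  have hsplit : (PySem.Str.split? text "\n\n").getD []
      = List.map String.ofList (splitNN text.toList) := by
    rw [PySem.Str.split?, PySem.Chars.split?]
    rw [show "\n\n".toList = ['\n', '\n'] from rfl]
    simp [splitOn_eq_splitNN]
  rw [hsplit, List.map_map, List.map_map]
  show PySem.Chars.join "".toList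
      (List.map
        (fun l : List Char =>
          ("<p>" ++ PySem.Str.replace (pyHtmlEscape (String.ofList l)) "\n" "<br>" ++ "</p>").toList)
        (splitNN text.toList))
    = ['<', 'p', '>'] ++ convGo text.toList ++ ['<', '/', 'p', '>']
  rw [List.map_congr_left (fun l _ => by
    rw [part_toList (String.ofList l), String.toList_ofList])]
  rw [show ("" : String).toList = [] from rfl]
  rw [joinWrap _ (by simp [splitNN_ne_nil])]
  rw [convGo_eq_joinBody]

-- ===== VERDICT (by name: the statement is the Claim_ definition above) =====
theorem plain_to_html_py_spec : Claim_equal_plain_to_html_py := by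
  intro text _
  unfold Spec_plain_to_html_py
  exact main_eq text
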